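-- pv_equiv track=rewrite | github.com/Shaderlayan/Ouroboros | tools/minihlsl.py | mask_inner
-- ===== SOURCE A (Python) =====
-- def mask_inner(mask: int, within: int, ignore_extraneous: bool = False) -> int:
--     if mask & ~within != 0 and not ignore_extraneous:
--         raise ValueError('mask %d does not fit within %d' % (mask, within))
--     components = [0, 0, 0, 0] if ignore_extraneous else [-1, -1, -1, -1]
--     j = 0
--     for i in range(4):
--         if within & (1 << i) != 0:
--             components[i] = 1 << j
--             j += 1
--     result = 0
--     for (i, c) in enumerate(components):
--         if mask & (1 << i) != 0:
--             result |= c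
--     if result < 0: # should have been caught by the initial check
--         raise RuntimeError('mask %d does not fit within %d' % (mask, within))
--     return result
-- ===== SOURCE B (Python) =====
-- def mask_inner(mask: int, within: int, ignore_extraneous: bool = False) -> int:
--     if mask & ~within != 0 and not ignore_extraneous:
--         raise ValueError('mask %d does not fit within %d' % (mask, within))
--     result = 0
--     j = 0
--     for i in range(4):
--         if within & (1 << i) != 0:
--             if mask & (1 << i) != 0:
--                 result |= 1 << j
--             j += 1
--     return result
-- ===== Notes on version B (the rewrite author's own statement) =====
-- stated objective: simpler
-- what changed: Replaces A's two-loop structure (build a 4-entry components table with a -1 sentinel, then a second enumerate scan ORing table entries, plus a dead negative-result RuntimeError branch) with a single fused pass that ORs the compacted bit directly while counting within-bits; the sentinel table and second scan disappear.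
import Mathlib
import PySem

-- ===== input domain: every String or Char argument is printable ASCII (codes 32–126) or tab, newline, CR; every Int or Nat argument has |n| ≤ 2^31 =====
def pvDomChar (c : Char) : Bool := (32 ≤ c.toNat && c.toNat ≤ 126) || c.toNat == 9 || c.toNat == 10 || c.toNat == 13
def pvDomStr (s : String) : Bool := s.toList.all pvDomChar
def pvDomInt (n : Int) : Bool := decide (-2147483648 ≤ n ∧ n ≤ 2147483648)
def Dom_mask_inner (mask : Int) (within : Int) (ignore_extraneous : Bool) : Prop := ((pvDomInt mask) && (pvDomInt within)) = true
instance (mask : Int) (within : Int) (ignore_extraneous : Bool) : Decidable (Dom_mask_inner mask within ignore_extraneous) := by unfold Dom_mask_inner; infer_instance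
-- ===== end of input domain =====

-- B replaces A's two fixed loops plus intermediate `components` table (and A's dead
-- negative-result RuntimeError branch) with one fused pass building the result directly: simpler.

-- Python's `a << k` for a : Int and a nonnegative literal k (type-pinning shim used by both ports)
def pyShl (a : Int) (k : Nat) : Int := a <<< k

-- ===== PORT A =====
-- Raising paths (the ValueError guard; the dead RuntimeError branch) return 0; outside Pre_.
-- Loop indices i come from range(4) / enumerate, so they are the literals 0..3 and i.toNat is exact.
def mask_inner (mask : Int) (within : Int) (ignore_extraneous : Bool) : Int :=
  if PySem.Int.band mask (Int.not within) ≠ 0 ∧ ignore_extraneous = false then 0  -- raise ValueError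
  else
    let components : List Int := if ignore_extraneous then [0, 0, 0, 0] else [-1, -1, -1, -1]
    let s := (PySem.List.pyRange 0 4 1).foldl
      (fun (s : List Int × Nat) i =>
        if PySem.Int.band within (pyShl 1 i.toNat) ≠ 0 then
          (s.1.set i.toNat (pyShl 1 s.2), s.2 + 1)
        else s)
      (components, 0)
    let result := (PySem.List.enumerate s.1).foldl
      (fun (r : Int) ic =>
        if PySem.Int.band mask (pyShl 1 ic.1.toNat) ≠ 0 then PySem.Int.bor r ic.2 else r)
      0
    if result < 0 then 0  -- raise RuntimeError (unreachable under Pre_)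
    else result

-- ===== PORT B =====
def mask_inner_alt (mask : Int) (within : Int) (ignore_extraneous : Bool) : Int :=
  if PySem.Int.band mask (Int.not within) ≠ 0 ∧ ignore_extraneous = false then 0  -- raise ValueError
  else
    ((PySem.List.pyRange 0 4 1).foldl
      (fun (s : Int × Nat) i =>
        if PySem.Int.band within (pyShl 1 i.toNat) ≠ 0 then
          ((if PySem.Int.band mask (pyShl 1 i.toNat) ≠ 0 then
              PySem.Int.bor s.1 (pyShl 1 s.2)
            else s.1), s.2 + 1)
        else s)
      (0, 0)).1

-- ===== PRECONDITION & SPEC =====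
-- Pre_ excludes exactly the inputs where A raises ValueError (extraneous mask bits, not ignored).
def Pre_mask_inner (mask : Int) (within : Int) (ignore_extraneous : Bool) : Prop :=
  ignore_extraneous = true ∨ PySem.Int.band mask (Int.not within) = 0
instance (mask : Int) (within : Int) (ignore_extraneous : Bool) : Decidable (Pre_mask_inner mask within ignore_extraneous) := by unfold Pre_mask_inner; infer_instance

def pvWitness_mask_inner : Int × Int × Bool := (5, 7, false)

def Spec_mask_inner (mask : Int) (within : Int) (ignore_extraneous : Bool) (out : Int) : Prop := out = mask_inner_alt mask within ignore_extraneous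
instance (mask : Int) (within : Int) (ignore_extraneous : Bool) (out : Int) : Decidable (Spec_mask_inner mask within ignore_extraneous out) := by unfold Spec_mask_inner; infer_instance

-- ===== CLAIM (what is proved, stated in full; the proofs are below) =====
def Claim_equal_mask_inner : Prop := ∀ (mask : Int) (within : Int) (ignore_extraneous : Bool), Dom_mask_inner mask within ignore_extraneous → Pre_mask_inner mask within ignore_extraneous → Spec_mask_inner mask within ignore_extraneous (mask_inner mask within ignore_extraneous)

-- ===== LEMMAS AND PROOFS =====

-- bit i of the infinite two's-complement representation of n (Python's bit semantics)
def pvBit (n : Int) (i : Nat) : Bool :=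
  if 0 ≤ n then n.toNat.testBit i else !((-n - 1).toNat.testBit i)

theorem pvBit_not (n : Int) (i : Nat) : pvBit (Int.not n) i = !(pvBit n i) := by
  cases n with
  | ofNat m => simp [Int.not, pvBit]
  | negSucc m =>
      have h1 : ¬ (0 : Int) ≤ Int.negSucc m := by omega
      simp [Int.not, pvBit, h1]

theorem band_two_pow_ne (a : Int) (i : Nat) :
    (PySem.Int.band a (pyShl 1 i) ≠ 0) ↔ pvBit a i = true := by
  have hp : pyShl 1 i = ((2 ^ i : Nat) : Int) := by
    simp [pyShl, Int.shiftLeft_eq]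
  rw [hp]
  unfold PySem.Int.band pvBit
  have hnn : (0:Int) ≤ ((2 ^ i : Nat) : Int) := by positivity
  have h2 : (((2 ^ i : Nat) : Int)).toNat = 2 ^ i := Int.toNat_natCast _
  have hpos : (0:Nat) < 2 ^ i := by positivity
  by_cases ha : 0 ≤ a
  · rw [if_pos ha, if_pos hnn, if_pos ha, h2, Nat.and_two_pow]
    cases h : a.toNat.testBit i <;> simp
  · rw [if_neg ha, if_pos hnn, if_neg ha, h2, Nat.two_pow_and]
    cases h : ((-a - 1).toNat.testBit i) <;> simp

theorem band_zero_bit (a b : Int) (i : Nat) (h : PySem.Int.band a b = 0) :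
    pvBit a i = true → pvBit b i = false := by
  unfold PySem.Int.band at h
  unfold pvBit
  by_cases ha : 0 ≤ a <;> by_cases hb : 0 ≤ b <;>
    simp only [ha, hb, if_true, if_false] at h ⊢
  · have h0 : a.toNat &&& b.toNat = 0 := by exact_mod_cast h
    intro hta
    have := Nat.testBit_and a.toNat b.toNat i
    rw [h0, Nat.zero_testBit, hta] at this
    simpa using this.symm
  · have hle : a.toNat &&& (-b - 1).toNat ≤ a.toNat := Nat.and_le_left
    have h0 : a.toNat = a.toNat &&& (-b - 1).toNat := by omega
    intro hta
    have := Nat.testBit_and a.toNat ((-b - 1).toNat) i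
    rw [← h0, hta] at this
    simp at this ⊢
    exact this
  · have hle : b.toNat &&& (-a - 1).toNat ≤ b.toNat := Nat.and_le_left
    have h0 : b.toNat = b.toNat &&& (-a - 1).toNat := by omega
    intro hta
    have := Nat.testBit_and b.toNat ((-a - 1).toNat) i
    rw [← h0] at this
    simp at hta
    cases htb : b.toNat.testBit i
    · rfl
    · rw [htb] at this; simp [hta] at this
  · exfalso; omega

-- under the guard: a mask bit set (below 4 or anywhere) forces the same within bit set
theorem mask_bit_within (mask within : Int) (i : Nat)
    (hb : PySem.Int.band mask (Int.not within) = 0)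
    (hm : PySem.Int.band mask (pyShl 1 i) ≠ 0) :
    PySem.Int.band within (pyShl 1 i) ≠ 0 := by
  rw [band_two_pow_ne] at hm ⊢
  have := band_zero_bit mask (Int.not within) i hb hm
  rw [pvBit_not] at this
  cases h : pvBit within i
  · rw [h] at this; simp at this
  · rfl

set_option maxHeartbeats 1000000 in
theorem mask_inner_spec : Claim_equal_mask_inner := by
  intro mask within ig _hdom hpre
  unfold Spec_mask_inner
  have hr : PySem.List.pyRange 0 4 1 = [0,1,2,3] := by decide
  cases ig with
  | true =>
      have hg : ¬ (PySem.Int.band mask (Int.not within) ≠ 0 ∧ (true : Bool) = false) := by simp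
      simp only [mask_inner, mask_inner_alt, hr]
      rw [if_neg hg, if_neg hg]
      by_cases w0 : PySem.Int.band within (pyShl 1 0) = 0 <;>
      by_cases w1 : PySem.Int.band within (pyShl 1 1) = 0 <;>
      by_cases w2 : PySem.Int.band within (pyShl 1 2) = 0 <;>
      by_cases w3 : PySem.Int.band within (pyShl 1 3) = 0 <;>
      by_cases m0 : PySem.Int.band mask (pyShl 1 0) = 0 <;>
      by_cases m1 : PySem.Int.band mask (pyShl 1 1) = 0 <;>
      by_cases m2 : PySem.Int.band mask (pyShl 1 2) = 0 <;>
      by_cases m3 : PySem.Int.band mask (pyShl 1 3) = 0 <;>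
      (try simp [w0, w1, w2, w3, m0, m1, m2, m3, PySem.List.enumerate, List.foldl]) <;>
      decide
  | false =>
      have hb : PySem.Int.band mask (Int.not within) = 0 := by
        rcases hpre with h | h
        · exact absurd h (by simp)
        · exact h
      have hg : ¬ (PySem.Int.band mask (Int.not within) ≠ 0 ∧ True) := by
        simp [hb]
      have hk := fun i => mask_bit_within mask within i hb
      simp only [mask_inner, mask_inner_alt, hr]
      rw [if_neg hg, if_neg hg]
      by_cases w0 : PySem.Int.band within (pyShl 1 0) = 0 <;>
      by_cases w1 : PySem.Int.band within (pyShl 1 1) = 0 <;>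
      by_cases w2 : PySem.Int.band within (pyShl 1 2) = 0 <;>
      by_cases w3 : PySem.Int.band within (pyShl 1 3) = 0 <;>
      (by_cases m0 : PySem.Int.band mask (pyShl 1 0) = 0 <;>
           by_cases m1 : PySem.Int.band mask (pyShl 1 1) = 0 <;>
           by_cases m2 : PySem.Int.band mask (pyShl 1 2) = 0 <;>
           by_cases m3 : PySem.Int.band mask (pyShl 1 3) = 0 <;>
           first
             | exact absurd w0 (hk 0 m0)
             | exact absurd w1 (hk 1 m1)
             | exact absurd w2 (hk 2 m2)
             | exact absurd w3 (hk 3 m3)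
             | ((try simp [w0, w1, w2, w3, m0, m1, m2, m3, PySem.List.enumerate, List.foldl]) <;>
                decide))
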